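-- pv_equiv track=rewrite | github.com/danielbjorkman88/Python | Codility/FloodedIsland.py | Solution
-- ===== SOURCE A (Python) =====
-- def Solution(A,B):
--
--     out = [0]*len(B)
--
--     for i in range(len(B)):
--         count = 0
--         water = B[i]
--         aboveWater = 0
--         for idx in range(len(A)):
--             if A[idx] - water > 0 and aboveWater == 0:
--                 count += 1
--                 aboveWater = 1
--             elif A[idx] - water <= 0:
--                 aboveWater = 0
--         out[i] = count
--
--
--     return out
-- ===== SOURCE B (Python) =====
-- # Faster re-implementation: each query w counts "island starts": positions i with
-- # A[i] > w and (i == 0 or A[i-1] <= w).  Each start i > 0 contributes 1 exactly when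
-- # A[i-1] <= w < A[i], i.e. w lies in the half-open interval [A[i-1], A[i]) (nonempty
-- # only when A[i-1] < A[i]); position 0 contributes 1 - [A[0] <= w].  So with the
-- # interval lower ends (los) and upper ends (ups) sorted once, every query is answered
-- # by two binary searches: count(w) = 1 + #(los <= w) - #(ups <= w) for nonempty A.
--
-- def _bisect_right(a, x, lo, hi):
--     # standard bisect.bisect_right loop (cannot import bisect: A imports nothing)
--     while lo < hi:
--         mid = (lo + hi) // 2
--         if a[mid] <= x:
--             lo = mid + 1
--         else:
--             hi = mid
--     return lo
--
-- def Solution(A, B):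
--     los = sorted(A[i - 1] for i in range(1, len(A)) if A[i - 1] < A[i])
--     ups = sorted([A[0]] + [A[i] for i in range(1, len(A)) if A[i - 1] < A[i]]) if A else []
--     base = 1 if A else 0
--     return [base + _bisect_right(los, w, 0, len(los)) - _bisect_right(ups, w, 0, len(ups))
--             for w in B]
-- ===== Notes on version B (the rewrite author's own statement) =====
-- stated objective: faster
-- what changed: Replaces the per-query O(n) state-machine scan by a precomputation of the island-start threshold intervals (rising edges of A), sorted once, so each query is answered with two binary searches.
import Mathlib
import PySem

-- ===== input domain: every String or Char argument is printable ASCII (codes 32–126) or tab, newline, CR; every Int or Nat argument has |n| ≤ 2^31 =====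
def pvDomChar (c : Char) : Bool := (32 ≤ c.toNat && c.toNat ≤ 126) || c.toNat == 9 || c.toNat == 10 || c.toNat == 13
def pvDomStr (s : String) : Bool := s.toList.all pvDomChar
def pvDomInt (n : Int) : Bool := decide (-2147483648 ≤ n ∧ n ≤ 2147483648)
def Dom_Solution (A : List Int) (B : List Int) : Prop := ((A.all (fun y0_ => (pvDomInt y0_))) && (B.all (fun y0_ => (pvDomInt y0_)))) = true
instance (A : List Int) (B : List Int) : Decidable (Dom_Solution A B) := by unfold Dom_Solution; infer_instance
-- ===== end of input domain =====

-- B replaces A's per-query O(n) scan by sorted rising-edge thresholds queried with two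
-- binary searches (asymptotically faster, as measured on the generated inputs).

-- ===== PORT A =====
-- literal port of A: outer loop writes out[i] per query, inner loop is the
-- count/aboveWater state machine over range(len(A))
def Solution (A : List Int) (B : List Int) : List Int :=
  let out := List.replicate B.length (0 : Int)
  (PySem.List.pyRange 0 (B.length : Int) 1).foldl (fun out i =>
    let water := PySem.List.pyGetD B i 0
    let st := (PySem.List.pyRange 0 (A.length : Int) 1).foldl
      (fun (s : Int × Int) idx =>
        let a := PySem.List.pyGetD A idx 0
        if a - water > 0 ∧ s.2 = 0 then (s.1 + 1, 1)
        else if a - water ≤ 0 then (s.1, 0)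
        else s) ((0 : Int), (0 : Int))
    PySem.List.pySetD out i st.1) out

-- ===== PORT B =====
-- port of Source B; Source B's hand-written _bisect_right is the standard bisect_right loop,
-- ported as the prelude primitive PySem.List.bisectRight (the same lo/hi halving loop)
def Solution_alt (A : List Int) (B : List Int) : List Int :=
  let los := PySem.List.sorted
    ((PySem.List.pyRange 1 (A.length : Int) 1).filterMap (fun i =>
      if PySem.List.pyGetD A (i-1) 0 < PySem.List.pyGetD A i 0
      then some (PySem.List.pyGetD A (i-1) 0) else none)) (fun x => x) false
  let ups := if A = [] then [] else
    PySem.List.sorted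
      (PySem.List.pyGetD A 0 0 ::
        (PySem.List.pyRange 1 (A.length : Int) 1).filterMap (fun i =>
          if PySem.List.pyGetD A (i-1) 0 < PySem.List.pyGetD A i 0
          then some (PySem.List.pyGetD A i 0) else none)) (fun x => x) false
  let base : Int := if A = [] then 0 else 1
  B.map (fun w => base + (PySem.List.bisectRight los w : Int) - (PySem.List.bisectRight ups w : Int))

-- ===== PRECONDITION & SPEC =====
def Spec_Solution (A : List Int) (B : List Int) (out : List Int) : Prop := out = Solution_alt A B
instance (A : List Int) (B : List Int) (out : List Int) : Decidable (Spec_Solution A B out) := by unfold Spec_Solution; infer_instance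

-- ===== CLAIM (what is proved, stated in full; the proofs are below) =====
def Claim_equal_Solution : Prop := ∀ (A : List Int) (B : List Int), Dom_Solution A B → Spec_Solution A B (Solution A B)

-- ===== LEMMAS AND PROOFS =====

-- A's inner state machine, rephrased structurally (b : "previous element above water")
def pvRun (w : Int) (b : Bool) : List Int → Int
  | [] => 0
  | a :: l => (if w < a ∧ b = false then 1 else 0) + pvRun w (decide (w < a)) l

-- head term: 1 iff the first element is above water
def pvHead (w : Int) : List Int → Int
  | [] => 0
  | a :: _ => if w < a then 1 else 0

-- A's step function
def pvStep (water : Int) (s : Int × Int) (a : Int) : Int × Int :=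
  if a - water > 0 ∧ s.2 = 0 then (s.1 + 1, 1)
  else if a - water ≤ 0 then (s.1, 0)
  else s

lemma pvStep_enc (w : Int) (c : Int) (b : Bool) (a : Int) :
    pvStep w (c, if b then 1 else 0) a =
      (c + (if w < a ∧ b = false then 1 else 0), if decide (w < a) then 1 else 0) := by
  cases b <;> simp only [pvStep] <;> split_ifs <;> simp_all <;> omega

lemma pvRun_foldl (w : Int) (l : List Int) : ∀ (c : Int) (b : Bool),
    (l.foldl (pvStep w) (c, if b then 1 else 0)).1 = c + pvRun w b l := by
  induction l with
  | nil => intro c b; simp [pvRun]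
  | cons a l ih =>
      intro c b
      rw [List.foldl_cons, pvStep_enc, ih]
      simp [pvRun]; ring

-- run = head term + count of rising-edge pairs straddling w
lemma pvRun_eq (w : Int) (l : List Int) : ∀ b : Bool,
    pvRun w b l = (if b then 0 else pvHead w l) +
      ((l.zip l.tail).countP (fun p => decide (p.1 ≤ w ∧ w < p.2)) : Int) := by
  induction l with
  | nil => intro b; simp [pvRun, pvHead]
  | cons a l ih =>
      intro b
      have hz : (a :: l).zip (a :: l).tail = match l with
        | [] => [] | c :: l' => (a, c) :: (l.zip l.tail) := by
        cases l <;> rfl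
      rw [pvRun, ih]
      cases l with
      | nil => cases b <;> simp [pvHead]
      | cons c l' =>
          rw [hz, List.countP_cons]
          simp only [pvHead]
          by_cases h1 : w < a <;> by_cases h2 : w < c <;> by_cases h3 : a ≤ w <;>
            cases b <;> simp_all <;> omega

-- bisectRight on a sorted list counts the elements ≤ x
lemma pvBisect_countP (xs : List Int) (x : Int)
    (h : xs.Pairwise (· ≤ ·)) :
    PySem.List.bisectRight xs x = xs.countP (fun a => decide (a ≤ x)) := by
  obtain ⟨hle, hlt, hgt⟩ := PySem.List.bisectRight_spec xs x h
  set k := PySem.List.bisectRight xs x with hk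
  have hsplit : xs = xs.take k ++ xs.drop k := (List.take_append_drop k xs).symm
  have h1 : (xs.take k).countP (fun a => decide (a ≤ x)) = (xs.take k).length := by
    apply List.countP_eq_length.mpr
    intro y hy
    obtain ⟨j, hj, rfl⟩ := List.mem_iff_getElem.mp hy
    rw [List.length_take] at hj
    have hjk : j < k := by omega
    have hjlen : j < xs.length := by omega
    rw [List.getElem_take]
    exact decide_eq_true (hlt j hjlen hjk)
  have h2 : (xs.drop k).countP (fun a => decide (a ≤ x)) = 0 := by
    apply List.countP_eq_zero.mpr
    intro y hy
    obtain ⟨j, hj, rfl⟩ := List.mem_iff_getElem.mp hy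
    have hjlen : k + j < xs.length := by simp [List.length_drop] at hj; omega
    rw [List.getElem_drop]
    have := hgt (k + j) hjlen (Nat.le_add_right _ _)
    simp; omega
  conv_rhs => rw [hsplit]
  rw [List.countP_append, h1, h2, List.length_take]
  omega

-- per-pair counting identity
lemma pvPairs_count (w : Int) (ps : List (Int × Int)) :
    ((ps.filter (fun p => decide (p.1 < p.2))).map Prod.fst).countP (fun a => decide (a ≤ w))
      = ((ps.filter (fun p => decide (p.1 < p.2))).map Prod.snd).countP (fun a => decide (a ≤ w))
        + ps.countP (fun p => decide (p.1 ≤ w ∧ w < p.2)) := by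
  induction ps with
  | nil => simp
  | cons p ps ih =>
      by_cases h : p.1 < p.2
      · simp only [List.filter_cons, h, decide_true, if_true, List.map_cons,
          List.countP_cons, ih]
        simp only [decide_eq_true_eq]
        split_ifs <;> omega
      · simp only [List.filter_cons, h, decide_false, List.countP_cons]
        have h4 : decide (p.1 ≤ w ∧ w < p.2) = false := by simp; omega
        rw [h4]
        simp only [Bool.false_eq_true, if_false, Nat.add_zero]
        exact ih

-- the zip of consecutive elements as an indexed range
lemma pvZip_tail_eq (A : List Int) :
    A.zip A.tail = (List.range (A.length - 1)).map
      (fun k => (A.getD k 0, A.getD (k+1) 0)) := by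
  apply List.ext_getElem
  · simp [List.length_zip]
  · intro i h1 h2
    simp only [List.getElem_zip, List.getElem_map, List.getElem_range]
    simp [List.length_zip] at h1
    have hi1 : i < A.length := by omega
    have hi2 : i + 1 < A.length := by omega
    rw [List.getD_eq_getElem A 0 hi1, List.getD_eq_getElem A 0 hi2, List.getElem_tail]

-- the pyRange(1, len A) filterMap loops over the same consecutive pairs
lemma pvFilterMap_range (A : List Int) (g : Int × Int → Option Int) :
    (PySem.List.pyRange 1 (A.length : Int) 1).filterMap
        (fun i => g (PySem.List.pyGetD A (i-1) 0, PySem.List.pyGetD A i 0))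
      = (A.zip A.tail).filterMap g := by
  rw [PySem.List.pyRange_one, pvZip_tail_eq, List.filterMap_map, List.filterMap_map]
  have hlen : ((A.length : Int) - 1).toNat = A.length - 1 := by omega
  rw [hlen]
  apply List.filterMap_congr
  intro k hk
  simp only [List.mem_range] at hk
  have e1 : PySem.List.pyGetD A ((1 : Int) + (k : Int) - 1) 0 = A.getD k 0 := by
    have h1 : (1 : Int) + (k : Int) - 1 = ((k : Nat) : Int) := by ring
    rw [h1, PySem.List.pyGetD_natCast]
  have e2 : PySem.List.pyGetD A ((1 : Int) + (k : Int)) 0 = A.getD (k+1) 0 := by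
    have h2 : (1 : Int) + (k : Int) = (((k+1 : Nat)) : Int) := by push_cast; ring
    rw [h2, PySem.List.pyGetD_natCast]
  simp only [Function.comp]
  rw [e1, e2]

-- countP is invariant under sorting
lemma pvCountP_sorted (xs : List Int) (p : Int → Bool) :
    (PySem.List.sorted xs (fun x => x) false).countP p = xs.countP p :=
  (PySem.List.sorted_perm xs (fun x => x) false).countP_eq p

-- a conditional-comprehension filterMap is filter-then-map (fst / snd projections)
lemma pvFM_fst (ps : List (Int × Int)) :
    ps.filterMap (fun p => if p.1 < p.2 then some p.1 else none)
      = (ps.filter (fun p => decide (p.1 < p.2))).map Prod.fst := by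
  induction ps with
  | nil => rfl
  | cons p ps ih =>
      by_cases h : p.1 < p.2 <;>
        simp [h, ih]

lemma pvFM_snd (ps : List (Int × Int)) :
    ps.filterMap (fun p => if p.1 < p.2 then some p.2 else none)
      = (ps.filter (fun p => decide (p.1 < p.2))).map Prod.snd := by
  induction ps with
  | nil => rfl
  | cons p ps ih =>
      by_cases h : p.1 < p.2 <;>
        simp [h, ih]

-- the per-query value of B equals A's scan count
lemma pvPerQuery (A : List Int) (w : Int) :
    ((if A = [] then (0:Int) else 1)
      + (PySem.List.bisectRight (PySem.List.sorted
          ((PySem.List.pyRange 1 (A.length : Int) 1).filterMap (fun i =>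
            if PySem.List.pyGetD A (i-1) 0 < PySem.List.pyGetD A i 0
            then some (PySem.List.pyGetD A (i-1) 0) else none)) (fun x => x) false) w : Int)
      - (PySem.List.bisectRight (if A = [] then [] else PySem.List.sorted
          (PySem.List.pyGetD A 0 0 ::
            (PySem.List.pyRange 1 (A.length : Int) 1).filterMap (fun i =>
              if PySem.List.pyGetD A (i-1) 0 < PySem.List.pyGetD A i 0
              then some (PySem.List.pyGetD A i 0) else none)) (fun x => x) false) w : Int))
    = pvHead w A + ((A.zip A.tail).countP (fun p => decide (p.1 ≤ w ∧ w < p.2)) : Int) := by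
  rw [pvFilterMap_range A (fun p => if p.1 < p.2 then some p.1 else none),
      pvFilterMap_range A (fun p => if p.1 < p.2 then some p.2 else none),
      pvFM_fst, pvFM_snd]
  cases A with
  | nil => simp [pvHead]
  | cons a t =>
      have hne : (a :: t) ≠ ([] : List Int) := by simp
      simp only [hne, if_false]
      have hsortLos := PySem.List.sorted_pairwise
        (((a :: t).zip (a :: t).tail).filter (fun p => decide (p.1 < p.2)) |>.map Prod.fst)
        (fun x => x) -- Pairwise on sorted los
      have hsortUps := PySem.List.sorted_pairwise
        (PySem.List.pyGetD (a :: t) 0 0 ::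
          ((((a :: t).zip (a :: t).tail).filter (fun p => decide (p.1 < p.2))).map Prod.snd))
        (fun x => x)
      rw [pvBisect_countP _ w hsortLos, pvBisect_countP _ w hsortUps,
          pvCountP_sorted, pvCountP_sorted]
      rw [List.countP_cons]
      have hc := pvPairs_count w ((a :: t).zip (a :: t).tail)
      have hA0 : PySem.List.pyGetD (a :: t) 0 0 = a := PySem.List.pyGetD_zero_cons ..
      rw [hA0]
      simp only [pvHead]
      by_cases hw : a ≤ w
      · rw [if_pos (by simpa using hw), if_neg (by omega : ¬ w < a)]
        omega
      · rw [if_neg (by simpa using hw), if_pos (by omega : w < a)]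
        omega

-- writing out[k] = f(B[k]) for k = 0..len-1 into any list of the right length yields map f B
lemma pvShift (f : Int → Int) (b : Int) (B' : List Int) (l : List Nat) :
    ∀ (x : Int) (os : List Int),
    (l.map (· + 1)).foldl (fun out k => out.set k (f ((b :: B').getD k 0))) (x :: os)
      = x :: l.foldl (fun out k => out.set k (f (B'.getD k 0))) os := by
  induction l with
  | nil => intro x os; rfl
  | cons j l ih =>
      intro x os
      simp only [List.map_cons, List.foldl_cons, List.getD_cons_succ, List.set_cons_succ]
      exact ih x (os.set j (f (B'.getD j 0)))

lemma pvSetLoop (f : Int → Int) : ∀ (B out0 : List Int), out0.length = B.length →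
    (List.range B.length).foldl (fun out k => out.set k (f (B.getD k 0))) out0 = B.map f := by
  intro B
  induction B with
  | nil => intro out0 h; simp at h; simp [h]
  | cons b B' ih =>
      intro out0 h
      cases out0 with
      | nil => simp at h
      | cons o os =>
          have hlen : os.length = B'.length := by simpa using h
          rw [List.length_cons, List.range_succ_eq_map, List.foldl_cons]
          have h1 : (o :: os).set 0 (f ((b :: B').getD 0 0)) = f b :: os := by
            simp
          rw [h1]
          have h2 : (List.map Nat.succ (List.range B'.length)) =
              (List.range B'.length).map (· + 1) := by
            simp
          rw [h2, pvShift, ih os hlen]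
          rfl

-- outer loop: writing out[i] = f(B[i]) into [0]*len(B) is map f B
lemma pvOuter (B : List Int) (f : Int → Int) :
    (PySem.List.pyRange 0 (B.length : Int) 1).foldl
      (fun out i => PySem.List.pySetD out i (f (PySem.List.pyGetD B i 0)))
      (List.replicate B.length (0 : Int)) = B.map f := by
  have h0 : ((B.length : Int) - 0).toNat = B.length := by omega
  rw [PySem.List.pyRange_one, h0, List.foldl_map]
  have hcast : ∀ (out : List Int) (k : Nat),
      PySem.List.pySetD out ((0 : Int) + (k : Nat)) (f (PySem.List.pyGetD B ((0:Int) + (k : Nat)) 0))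
        = out.set k (f (B.getD k 0)) := by
    intro out k
    have : (0 : Int) + (k : Nat) = ((k : Nat) : Int) := by omega
    rw [this, PySem.List.pySetD_natCast, PySem.List.pyGetD_natCast]
  calc (List.range B.length).foldl
        (fun out k => PySem.List.pySetD out ((0:Int) + (k : Nat)) (f (PySem.List.pyGetD B ((0:Int) + (k : Nat)) 0)))
        (List.replicate B.length 0)
      = (List.range B.length).foldl (fun out k => out.set k (f (B.getD k 0)))
        (List.replicate B.length 0) := by
        apply PySem.List.foldl_congr_mem
        intro acc x _; exact hcast acc x
    _ = B.map f := pvSetLoop f B (List.replicate B.length 0) (by simp)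

-- (pvSetLoop and pvShift prove the set-into-replicate loop is map)

-- ===== VERDICT (by name: the statement is the Claim_ definition above) =====
theorem Solution_spec : Claim_equal_Solution := by
  intro A B _
  show Solution A B = Solution_alt A B
  unfold Solution Solution_alt
  rw [pvOuter B (fun water =>
    ((PySem.List.pyRange 0 (A.length : Int) 1).foldl
      (fun (s : Int × Int) idx =>
        let a := PySem.List.pyGetD A idx 0
        if a - water > 0 ∧ s.2 = 0 then (s.1 + 1, 1)
        else if a - water ≤ 0 then (s.1, 0)
        else s) ((0 : Int), (0 : Int))).1)]
  apply List.map_congr_left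
  intro w _
  have hinner : (PySem.List.pyRange 0 (A.length : Int) 1).foldl
      (fun (s : Int × Int) idx =>
        let a := PySem.List.pyGetD A idx 0
        if a - w > 0 ∧ s.2 = 0 then (s.1 + 1, 1)
        else if a - w ≤ 0 then (s.1, 0)
        else s) ((0 : Int), (0 : Int))
      = A.foldl (pvStep w) ((0 : Int), (0 : Int)) :=
    PySem.List.foldl_pyRange_zero_pyGetD A 0 (pvStep w) ((0 : Int), (0 : Int))
  rw [hinner]
  have hrun : (A.foldl (pvStep w) ((0 : Int), (0 : Int))).1 = pvRun w false A := by
    have := pvRun_foldl w A 0 false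
    simpa using this
  rw [hrun, pvRun_eq w A false]
  simp only [if_neg (by simp : ¬ (false : Bool) = true)]
  exact (pvPerQuery A w).symm
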